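-- pv_equiv track=rewrite | github.com/jeanbaptistemora/fluidattacks-universe2 | integrates/deploy/permissions_matrix/matrix.py | fill_matrix
-- ===== SOURCE A (Python) =====
-- from typing import (
--     Dict,
--     List,
--     Set,
-- )
--
-- def fill_matrix(
--     roles_and_permissions: Dict[str, Dict[str, Set[str]]],
--     columns: List[str],
--     all_actions: List[str],
-- ) -> Dict[str, List[str]]:
--     dataset = {}
--     for role in columns:
--         values = []
--         for action in all_actions:
--             is_action = (
--                 "X"
--                 if action in roles_and_permissions[role]["actions"]
--                 else " "
--             )
--             values.append(is_action)
--         dataset[role] = values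
--     return dataset
-- ===== SOURCE B (Python) =====
-- def fill_matrix(
--     roles_and_permissions,
--     columns,
--     all_actions,
-- ):
--     # Trivial case: no actions at all, every row is empty.
--     if not all_actions:
--         return {role: [] for role in columns}
--     # Invert all_actions once: action -> list of column positions (handles duplicates).
--     index = {}
--     for i, action in enumerate(all_actions):
--         index.setdefault(action, []).append(i)
--     dataset = {}
--     for role in columns:
--         row = [" "] * len(all_actions)
--         for action in roles_and_permissions[role]["actions"]:
--             for i in index.get(action, []):
--                 row[i] = "X"
--         dataset[role] = row
--     return dataset
-- ===== Notes on version B (the rewrite author's own statement) =====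
-- stated objective: alternative
-- what changed: B inverts all_actions once into an action->positions index and, per role, fills a preallocated blank row by writing 'X' at the indexed positions of the role's permitted actions (with a trivial early return of empty rows when all_actions is empty), instead of scanning all_actions per role with a membership test per cell.
import Mathlib
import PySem

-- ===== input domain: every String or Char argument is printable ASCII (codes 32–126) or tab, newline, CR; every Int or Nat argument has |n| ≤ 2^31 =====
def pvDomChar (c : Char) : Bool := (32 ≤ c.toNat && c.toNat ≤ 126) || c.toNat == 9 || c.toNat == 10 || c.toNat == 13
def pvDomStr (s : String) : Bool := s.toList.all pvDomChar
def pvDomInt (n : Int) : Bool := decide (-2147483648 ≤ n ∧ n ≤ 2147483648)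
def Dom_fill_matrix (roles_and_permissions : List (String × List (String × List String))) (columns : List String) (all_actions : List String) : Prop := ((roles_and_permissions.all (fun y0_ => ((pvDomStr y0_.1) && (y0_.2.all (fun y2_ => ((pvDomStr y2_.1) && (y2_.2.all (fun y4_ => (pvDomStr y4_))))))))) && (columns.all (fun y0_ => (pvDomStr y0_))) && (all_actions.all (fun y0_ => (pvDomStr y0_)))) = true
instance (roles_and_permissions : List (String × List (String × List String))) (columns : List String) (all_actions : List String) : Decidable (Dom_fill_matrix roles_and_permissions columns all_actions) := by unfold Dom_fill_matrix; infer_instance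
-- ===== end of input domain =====

-- B builds an action→positions index once and writes "X" by position into a blank row per role
-- (empty all_actions short-circuits to empty rows), instead of scanning all_actions with a
-- membership test per cell (alternative decomposition, same result).


-- ===== PORT A =====
def fill_matrix (roles_and_permissions : List (String × List (String × List String))) (columns : List String) (all_actions : List String) : List (String × List String) :=
  (columns.foldl (fun (dataset : PySem.Dict String (List String)) role =>
      -- roles_and_permissions[role]["actions"]; when all_actions ≠ [], Pre_ guarantees both
      -- keys are present, so getD never hits its default; when all_actions = [] the inner
      -- loop is empty and the lookup result is unused, exactly as in the Python
      let acts : List String :=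
        (PySem.Dict.mk ((PySem.Dict.mk roles_and_permissions).getD role [])).getD "actions" []
      let values := all_actions.foldl (fun vs action =>
        vs ++ [if acts.contains action then "X" else " "]) []
      dataset.insert role values)
    PySem.Dict.empty).items

-- ===== PORT B =====
-- index.setdefault(action, []).append(i): group the (action, i) pairs of enumerate(all_actions) by action
def pvBuildIndex (all_actions : List String) : PySem.Dict String (List Int) :=
  ((PySem.List.enumerate all_actions).map (fun p => (p.2, p.1))).foldl
    (fun d p => d.modify p.1 [] (· ++ [p.2])) PySem.Dict.empty

def fill_matrix_alt (roles_and_permissions : List (String × List (String × List String))) (columns : List String) (all_actions : List String) : List (String × List String) :=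
  -- if not all_actions: return {role: [] for role in columns}
  if all_actions.isEmpty then
    (columns.foldl (fun (d : PySem.Dict String (List String)) role => d.insert role []) PySem.Dict.empty).items
  else
    let index := pvBuildIndex all_actions
    (columns.foldl (fun (dataset : PySem.Dict String (List String)) role =>
        let acts : List String :=
          (PySem.Dict.mk ((PySem.Dict.mk roles_and_permissions).getD role [])).getD "actions" []
        -- row = [" "] * len(all_actions); row[i] = "X" (all indices from enumerate are 0 ≤ i < len, so List.set is exact)
        let row := acts.foldl (fun row a =>
            (index.getD a []).foldl (fun row i => row.set i.toNat "X") row)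
          (List.replicate all_actions.length " ")
        dataset.insert role row)
      PySem.Dict.empty).items

-- ===== PRECONDITION & SPEC =====
-- Pre_: unless all_actions is empty (then neither program touches the role dicts), every role of
-- columns occurs as a key of roles_and_permissions and its dict has key "actions" — otherwise both
-- Pythons raise KeyError; key lists are duplicate-free, as association lists from Python dicts always are.
def Pre_fill_matrix (roles_and_permissions : List (String × List (String × List String))) (columns : List String) (all_actions : List String) : Prop :=
  (roles_and_permissions.map (·.1)).Nodup ∧
  (∀ p ∈ roles_and_permissions, (p.2.map (·.1)).Nodup) ∧
  (all_actions = [] ∨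
    (columns.all (fun r =>
      ((roles_and_permissions.find? (fun p => p.1 == r)).map
        (fun p => p.2.any (fun q => q.1 == "actions"))).getD false)) = true)
instance (roles_and_permissions : List (String × List (String × List String))) (columns : List String) (all_actions : List String) : Decidable (Pre_fill_matrix roles_and_permissions columns all_actions) := by unfold Pre_fill_matrix; infer_instance
def pvWitness_fill_matrix : (List (String × List (String × List String))) × List String × List String :=
  ([("admin", [("actions", ["read", "write"])]), ("guest", [("actions", ["read"])])],
   ["admin", "guest"], ["read", "write", "delete"])
def Spec_fill_matrix (roles_and_permissions : List (String × List (String × List String))) (columns : List String) (all_actions : List String) (out : List (String × List String)) : Prop := out = fill_matrix_alt roles_and_permissions columns all_actions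
instance (roles_and_permissions : List (String × List (String × List String))) (columns : List String) (all_actions : List String) (out : List (String × List String)) : Decidable (Spec_fill_matrix roles_and_permissions columns all_actions out) := by unfold Spec_fill_matrix; infer_instance

-- ===== CLAIM (what is proved, stated in full; the proofs are below) =====
def Claim_equal_fill_matrix : Prop := ∀ (roles_and_permissions : List (String × List (String × List String))) (columns : List String) (all_actions : List String), Dom_fill_matrix roles_and_permissions columns all_actions → Pre_fill_matrix roles_and_permissions columns all_actions → Spec_fill_matrix roles_and_permissions columns all_actions (fill_matrix roles_and_permissions columns all_actions)

-- ===== LEMMAS AND PROOFS =====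

-- length is preserved by a loop of row[i] = "X"
theorem pvFoldlSet_length (ps : List Int) (row : List String) :
    (ps.foldl (fun r i => r.set i.toNat "X") row).length = row.length := by
  induction ps generalizing row with
  | nil => rfl
  | cons i rest ih => simp [List.foldl_cons, ih, List.length_set]

-- elementwise effect of a loop of row[i] = "X" over nonnegative indices
theorem pvFoldlSet_getElem? (ps : List Int) (hps : ∀ i ∈ ps, 0 ≤ i) (row : List String) (j : Nat) :
    (ps.foldl (fun r i => r.set i.toNat "X") row)[j]? =
      if (j : Int) ∈ ps ∧ j < row.length then some "X" else row[j]? := by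
  induction ps generalizing row with
  | nil => simp
  | cons i rest ih =>
    have hi : 0 ≤ i := hps i (by simp)
    have hrest : ∀ x ∈ rest, 0 ≤ x := fun x hx => hps x (by simp [hx])
    rw [List.foldl_cons, ih hrest]
    rw [List.length_set, List.getElem?_set]
    by_cases hji : (j : Int) = i
    · have : i.toNat = j := by omega
      by_cases hjr : (j : Int) ∈ rest <;> by_cases hlt : j < row.length <;>
        simp_all
    · have : ¬ i.toNat = j := by omega
      by_cases hjr : (j : Int) ∈ rest <;> simp_all

-- the index maps an action to the positions where it occurs in all_actions
theorem pvBuildIndex_getD (xs : List String) (a : String) :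
    (pvBuildIndex xs).getD a [] =
      ((PySem.List.enumerate xs).filter (fun p => p.2 == a)).map (·.1) := by
  unfold pvBuildIndex
  rw [PySem.Dict.getD_foldl_modify_append]
  simp [List.filter_map, List.map_map, Function.comp_def]

theorem pvMemIndex (xs : List String) (a : String) (j : Nat) :
    ((j : Int) ∈ (pvBuildIndex xs).getD a []) ↔ ∃ h : j < xs.length, xs[j] = a := by
  rw [pvBuildIndex_getD]
  simp only [List.mem_map, List.mem_filter, PySem.List.mem_enumerate_iff]
  constructor
  · rintro ⟨p, ⟨⟨k, hk, rfl⟩, hpa⟩, hfst⟩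
    simp only [beq_iff_eq] at hpa
    have hkj : k = j := by
      have : (0 + (k : Int)) = (j : Int) := hfst
      omega
    subst hkj
    exact ⟨hk, hpa⟩
  · rintro ⟨h, rfl⟩
    exact ⟨((j : Int), xs[j]), ⟨⟨j, h, by simp⟩, by simp⟩, rfl⟩

theorem pvIndex_nonneg (xs : List String) (a : String) :
    ∀ i ∈ (pvBuildIndex xs).getD a [], 0 ≤ i := by
  rw [pvBuildIndex_getD]
  intro i hi
  simp only [List.mem_map, List.mem_filter, PySem.List.mem_enumerate_iff] at hi
  obtain ⟨p, ⟨⟨k, hk, rfl⟩, _⟩, rfl⟩ := hi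
  omega

-- elementwise effect of the whole per-role fill loop
theorem pvRowLoop_getElem? (xs : List String) (acts : List String) (row : List String) (j : Nat)
    (hlen : row.length = xs.length) :
    (acts.foldl (fun row a =>
        ((pvBuildIndex xs).getD a []).foldl (fun r i => r.set i.toNat "X") row) row)[j]? =
      if (∃ h : j < xs.length, xs[j] ∈ acts) then some "X" else row[j]? := by
  induction acts generalizing row with
  | nil => simp
  | cons a rest ih =>
    rw [List.foldl_cons]
    rw [ih _ (by rw [pvFoldlSet_length]; exact hlen)]
    rw [pvFoldlSet_getElem? _ (pvIndex_nonneg xs a) row j]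
    by_cases hmem : (j : Int) ∈ (pvBuildIndex xs).getD a []
    · rcases (pvMemIndex xs a j).mp hmem with ⟨h, hxa⟩
      simp_all
    · have : ¬ (∃ h : j < xs.length, xs[j] = a) := fun ⟨h, hx⟩ => hmem ((pvMemIndex xs a j).mpr ⟨h, hx⟩)
      by_cases hr : ∃ h : j < xs.length, xs[j] ∈ rest <;> simp_all

-- B's row equals A's row
theorem pvRow_eq (xs : List String) (acts : List String) :
    acts.foldl (fun row a =>
        ((pvBuildIndex xs).getD a []).foldl (fun r i => r.set i.toNat "X") row)
      (List.replicate xs.length " ") =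
      xs.map (fun action => if acts.contains action then "X" else " ") := by
  apply List.ext_getElem?
  intro j
  rw [pvRowLoop_getElem? xs acts _ j (by simp)]
  by_cases hj : j < xs.length
  · by_cases hm : xs[j] ∈ acts <;>
      simp_all
  · simp_all

-- ===== VERDICT (by name: the statement is the Claim_ definition above) =====
theorem fill_matrix_spec : Claim_equal_fill_matrix := by
  intro rp columns all_actions _ _
  unfold Spec_fill_matrix fill_matrix fill_matrix_alt
  by_cases hE : all_actions.isEmpty
  · rw [if_pos hE]
    rw [List.isEmpty_iff] at hE
    subst hE
    simp
  · rw [if_neg hE]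
    congr 1
    apply PySem.List.foldl_congr_mem
    intro dataset role _
    dsimp only
    rw [PySem.List.foldl_append_singleton_eq_map, List.nil_append, pvRow_eq]
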